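-- pv_equiv track=rewrite | github.com/bhuvanthirwani/MyLeetcode | 1-two-sum/two-sum.py | find
-- ===== SOURCE A (Python) =====
-- def find(x,y, A):
--     count=0
--     p,q=-1,-1
--     for i in A:
--         if p==-1 and x==i:
--             p=count
--         elif q==-1 and y==i:
--             q=count
--         count+=1
--     return [p,q]
-- ===== SOURCE B (Python) =====
-- def find(x, y, A):
--     p = A.index(x) if x in A else -1
--     if x == y:
--         if p == -1:
--             q = -1
--         else:
--             try:
--                 q = A.index(y, p + 1)
--             except ValueError:
--                 q = -1
--     else:
--         q = A.index(y) if y in A else -1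
--     return [p, q]
-- ===== Notes on version B (the rewrite author's own statement) =====
-- stated objective: idiomatic
-- what changed: Replaces the elif-driven single manual scan with counter and two sentinel accumulators by direct library index lookups (list.index / in) plus an explicit case split on x == y, where the second occurrence is looked up with index(y, p+1).
import Mathlib
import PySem

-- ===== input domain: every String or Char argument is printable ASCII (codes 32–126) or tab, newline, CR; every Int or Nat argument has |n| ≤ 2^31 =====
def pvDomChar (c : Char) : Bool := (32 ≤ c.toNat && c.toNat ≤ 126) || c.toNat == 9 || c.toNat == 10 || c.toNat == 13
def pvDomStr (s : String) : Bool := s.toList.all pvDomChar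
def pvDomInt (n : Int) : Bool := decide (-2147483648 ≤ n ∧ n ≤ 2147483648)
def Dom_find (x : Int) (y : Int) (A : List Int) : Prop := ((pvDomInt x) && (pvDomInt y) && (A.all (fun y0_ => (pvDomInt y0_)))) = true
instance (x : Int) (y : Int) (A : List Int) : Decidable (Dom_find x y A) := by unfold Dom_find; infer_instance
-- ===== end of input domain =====

-- B replaces A's elif-driven manual scan by library index lookups with an explicit x == y case split (idiomatic, same cost).

-- ===== PORT A =====
-- the loop body of A: state (count, p, q)
def findStep (x y : Int) (st : Int × Int × Int) (i : Int) : Int × Int × Int :=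
  if st.2.1 = -1 ∧ x = i then (st.1 + 1, st.1, st.2.2)
  else if st.2.2 = -1 ∧ y = i then (st.1 + 1, st.2.1, st.1)
  else (st.1 + 1, st.2.1, st.2.2)

def find (x : Int) (y : Int) (A : List Int) : List Int :=
  let s := A.foldl (findStep x y) (0, -1, -1)
  [s.2.1, s.2.2]

-- ===== PORT B =====
def find_alt (x : Int) (y : Int) (A : List Int) : List Int :=
  -- p = A.index(x) if x in A else -1
  let p : Int := match PySem.List.index? A x with | some i => (i : Int) | none => -1
  let q : Int :=
    if x = y then
      if p = -1 then -1
      else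
        -- A.index(y, p+1) with try/except ValueError: exact via index? on A.drop (p+1),
        -- since here 0 ≤ p+1 ≤ len A (p is a valid index of A)
        match PySem.List.index? (A.drop (p + 1).toNat) y with
        | some j => p + 1 + (j : Int)
        | none => -1
    else
      match PySem.List.index? A y with | some j => (j : Int) | none => -1
  [p, q]

-- ===== PRECONDITION & SPEC =====
def Spec_find (x : Int) (y : Int) (A : List Int) (out : List Int) : Prop := out = find_alt x y A
instance (x : Int) (y : Int) (A : List Int) (out : List Int) : Decidable (Spec_find x y A out) := by unfold Spec_find; infer_instance

-- ===== CLAIM (what is proved, stated in full; the proofs are below) =====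
def Claim_equal_find : Prop := ∀ (x : Int) (y : Int) (A : List Int), Dom_find x y A → Spec_find x y A (find x y A)

-- ===== LEMMAS AND PROOFS =====

-- first index of v in l, counting from c; -1 if absent
def firstIdx (v : Int) : List Int → Int → Int
  | [], _ => -1
  | a :: t, c => if v = a then c else firstIdx v t (c + 1)

theorem firstIdx_eq_index? (v : Int) (l : List Int) (c : Int) :
    firstIdx v l c = (match PySem.List.index? l v with | some i => c + (i : Int) | none => -1) := by
  induction l generalizing c with
  | nil => simp [firstIdx, PySem.List.index?_eq_idxOf?, List.idxOf?]
  | cons a t ih =>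
    by_cases h : a = v
    · subst h
      rw [PySem.List.index?_cons_self]
      simp [firstIdx]
    · rw [PySem.List.index?_cons_of_ne t h]
      have hv : ¬ v = a := fun hh => h hh.symm
      simp only [firstIdx, if_neg hv, ih]
      cases PySem.List.index? t v with
      | none => simp
      | some i =>
        simp only [Option.map_some]
        push_cast
        ring

theorem foldl_step_done (x y : Int) (l : List Int) (c p q : Int)
    (hp : p ≠ -1) (hq : q ≠ -1) :
    (l.foldl (findStep x y) (c, p, q)).2 = (p, q) := by
  induction l generalizing c with
  | nil => rfl
  | cons a t ih =>
    simp only [List.foldl_cons, findStep, hp, hq, false_and, if_false]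
    exact ih (c + 1)

theorem foldl_step_p_set (x y : Int) (l : List Int) (c p : Int)
    (hp : p ≠ -1) (hc : 0 ≤ c) :
    (l.foldl (findStep x y) (c, p, -1)).2 = (p, firstIdx y l c) := by
  induction l generalizing c with
  | nil => rfl
  | cons a t ih =>
    by_cases hy : y = a
    · subst hy
      simp only [List.foldl_cons, findStep, hp, false_and, if_false, and_true, if_true]
      rw [foldl_step_done x y t (c + 1) p c hp (by omega)]
      simp [firstIdx]
    · simp only [List.foldl_cons, findStep, hp, false_and, if_false, hy, and_false]
      rw [ih (c + 1) (by omega)]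
      simp [firstIdx, hy]

theorem foldl_step_q_set (x y : Int) (l : List Int) (c q : Int)
    (hq : q ≠ -1) (hc : 0 ≤ c) :
    (l.foldl (findStep x y) (c, -1, q)).2 = (firstIdx x l c, q) := by
  induction l generalizing c with
  | nil => rfl
  | cons a t ih =>
    by_cases hx : x = a
    · subst hx
      simp only [List.foldl_cons, findStep, and_true, if_true]
      rw [foldl_step_done x y t (c + 1) c q (by omega) hq]
      simp [firstIdx]
    · simp only [List.foldl_cons, findStep, hx, and_false, if_false, hq, false_and]
      rw [ih (c + 1) (by omega)]
      simp [firstIdx, hx]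

theorem foldl_step_ne (x y : Int) (hxy : x ≠ y) (l : List Int) (c : Int) (hc : 0 ≤ c) :
    (l.foldl (findStep x y) (c, -1, -1)).2 = (firstIdx x l c, firstIdx y l c) := by
  induction l generalizing c with
  | nil => rfl
  | cons a t ih =>
    by_cases hx : x = a
    · subst hx
      have hy : ¬ y = x := fun h => hxy h.symm
      simp only [List.foldl_cons, findStep, and_true, if_true]
      rw [foldl_step_p_set x y t (c + 1) c (by omega) (by omega)]
      simp [firstIdx, hy]
    · by_cases hy : y = a
      · subst hy
        simp only [List.foldl_cons, findStep, hx, and_false, if_false, and_true, if_true]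
        rw [foldl_step_q_set x y t (c + 1) c (by omega) (by omega)]
        simp [firstIdx, hx]
      · simp only [List.foldl_cons, findStep, hx, and_false, if_false, hy]
        rw [ih (c + 1) (by omega)]
        simp [firstIdx, hx, hy]

theorem foldl_step_eq (x : Int) (l : List Int) (c : Int) (hc : 0 ≤ c) :
    (l.foldl (findStep x x) (c, -1, -1)).2 =
      (match PySem.List.index? l x with
       | none => (-1, -1)
       | some i => (c + (i : Int), firstIdx x (l.drop (i + 1)) (c + (i : Int) + 1))) := by
  induction l generalizing c with
  | nil => simp [PySem.List.index?_eq_idxOf?, List.idxOf?]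
  | cons a t ih =>
    by_cases hx : a = x
    · subst hx
      rw [PySem.List.index?_cons_self]
      simp only [List.foldl_cons, findStep, and_true, if_true]
      rw [foldl_step_p_set a a t (c + 1) c (by omega) (by omega)]
      simp
    · have hx' : ¬ x = a := fun h => hx h.symm
      rw [PySem.List.index?_cons_of_ne t hx]
      simp only [List.foldl_cons, findStep, hx', and_false, if_false]
      rw [ih (c + 1) (by omega)]
      cases PySem.List.index? t x with
      | none => simp
      | some i =>
        simp only [Option.map_some, List.drop_succ_cons, Prod.mk.injEq]
        refine ⟨by push_cast; ring, ?_⟩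
        congr 1
        push_cast
        ring

-- ===== VERDICT (by name: the statement is the Claim_ definition above) =====
theorem find_spec : Claim_equal_find := by
  intro x y A _
  simp only [Spec_find, find, find_alt]
  by_cases hxy : x = y
  · subst hxy
    rw [foldl_step_eq x A 0 le_rfl]
    cases PySem.List.index? A x with
    | none => simp
    | some i =>
      have hi : ¬ ((i : Int) = -1) := by omega
      have hnat : ((i : Int) + 1).toNat = i + 1 := by omega
      simp only [if_neg hi, Int.zero_add, hnat, if_true]
      rw [firstIdx_eq_index?]
  · rw [foldl_step_ne x y hxy A 0 le_rfl]
    simp only [if_neg hxy]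
    rw [firstIdx_eq_index?, firstIdx_eq_index?]
    cases PySem.List.index? A x <;> cases PySem.List.index? A y <;> simp
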